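-- pv_equiv track=rewrite | github.com/ngpepin/mdexplore | mdexplore_app/search.py | tokenize_match_query
-- ===== SOURCE A (Python) =====
-- SearchToken = tuple[str, str, bool]
--
-- def tokenize_match_query(query: str) -> list[SearchToken]:
--     """Tokenize query supporting operators plus single/double-quoted terms."""
--     tokens: list[SearchToken] = []
--     i = 0
--     length = len(query)
--
--     while i < length:
--         ch = query[i]
--         if ch.isspace():
--             i += 1
--             continue
--         if ch == "(":
--             tokens.append(("LPAREN", ch, False))
--             i += 1
--             continue
--         if ch == ")":
--             tokens.append(("RPAREN", ch, False))
--             i += 1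
--             continue
--         if ch == ",":
--             tokens.append(("COMMA", ch, False))
--             i += 1
--             continue
--         if ch in {'"', "'"}:
--             quote_char = ch
--             is_case_sensitive = quote_char == "'"
--             i += 1
--             buffer: list[str] = []
--             while i < length:
--                 current = query[i]
--                 if current == "\\" and i + 1 < length:
--                     next_char = query[i + 1]
--                     if next_char in {quote_char, "\\"}:
--                         buffer.append(next_char)
--                         i += 2
--                         continue
--                 if current == quote_char:
--                     i += 1
--                     break
--                 buffer.append(current)
--                 i += 1
--             tokens.append(("TERM", "".join(buffer), is_case_sensitive))
--             continue
--
--         start = i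
--         while i < length and not query[i].isspace() and query[i] not in "(),":
--             i += 1
--         token_value = query[start:i]
--         if not token_value:
--             continue
--         upper = token_value.upper()
--         if upper in {"AND", "OR", "NOT"}:
--             tokens.append(("OP", upper, False))
--         elif upper in {"NEAR", "CLOSE"}:
--             # `CLOSE(...)` remains accepted as a legacy alias, but the parser
--             # and AST normalize both spellings to the canonical `NEAR` form.
--             tokens.append(("NEAR", "NEAR", False))
--         else:
--             tokens.append(("TERM", token_value, False))
--
--     return tokens
-- ===== SOURCE B (Python) =====
-- # B: single-pass character-driven state machine (modes: default/word/quote/esc)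
-- # instead of A's index-walking nested while loops.
--
-- SearchToken = tuple[str, str, bool]
--
-- _PUNCT = {"(": "LPAREN", ")": "RPAREN", ",": "COMMA"}
--
--
-- def _classify(word: str) -> "SearchToken":
--     upper = word.upper()
--     if upper in ("AND", "OR", "NOT"):
--         return ("OP", upper, False)
--     if upper in ("NEAR", "CLOSE"):
--         return ("NEAR", "NEAR", False)
--     return ("TERM", word, False)
--
--
-- def tokenize_match_query(query: str) -> list:
--     tokens = []
--     mode = "default"
--     buf = []
--     quote = ""
--     for ch in query:
--         if mode == "default":
--             if ch.isspace():
--                 continue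
--             if ch in _PUNCT:
--                 tokens.append((_PUNCT[ch], ch, False))
--             elif ch in "'\"":
--                 mode, quote, buf = "quote", ch, []
--             else:
--                 mode, buf = "word", [ch]
--         elif mode == "word":
--             if ch.isspace():
--                 tokens.append(_classify("".join(buf)))
--                 mode = "default"
--             elif ch in _PUNCT:
--                 tokens.append(_classify("".join(buf)))
--                 tokens.append((_PUNCT[ch], ch, False))
--                 mode = "default"
--             else:
--                 buf.append(ch)
--         elif mode == "quote":
--             if ch == "\\":
--                 mode = "esc"
--             elif ch == quote:
--                 tokens.append(("TERM", "".join(buf), quote == "'"))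
--                 mode = "default"
--             else:
--                 buf.append(ch)
--         else:  # esc: previous char was a backslash inside a quoted term
--             if ch == quote or ch == "\\":
--                 buf.append(ch)
--             else:
--                 buf.append("\\")
--                 buf.append(ch)
--             mode = "quote"
--     if mode == "word":
--         tokens.append(_classify("".join(buf)))
--     elif mode == "quote":
--         tokens.append(("TERM", "".join(buf), quote == "'"))
--     elif mode == "esc":
--         buf.append("\\")
--         tokens.append(("TERM", "".join(buf), quote == "'"))
--     return tokens
-- ===== Notes on version B (the rewrite author's own statement) =====
-- stated objective: alternative
-- what changed: A walks an index with nested while-loops (separate inner loops for quoted terms and bare words, slicing and backtracking via index arithmetic); B is a single forward pass over the characters driven by a four-mode state machine (default/word/quote/escape) with an explicit buffer, flushing the pending token once at end of input.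
import Mathlib
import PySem

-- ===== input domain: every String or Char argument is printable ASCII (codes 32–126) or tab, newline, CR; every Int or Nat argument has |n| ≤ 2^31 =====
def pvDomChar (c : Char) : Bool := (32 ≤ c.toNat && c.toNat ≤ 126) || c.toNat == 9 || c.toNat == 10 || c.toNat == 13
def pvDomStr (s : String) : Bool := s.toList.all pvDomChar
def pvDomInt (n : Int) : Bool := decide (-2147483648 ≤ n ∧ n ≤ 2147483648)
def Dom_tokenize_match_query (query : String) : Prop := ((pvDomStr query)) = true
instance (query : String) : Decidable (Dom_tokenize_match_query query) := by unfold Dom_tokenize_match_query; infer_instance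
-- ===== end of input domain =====

-- B replaces A's index-walking nested while loops by a single-pass four-mode state
-- machine folded over the characters (objective: alternative structure, same cost).

-- ===== PORT A =====
-- A's inner quoted-term loop: state (buffer, remaining chars); returns (buffer, rest after closing quote)
def pvScanQuoteA (q : Char) (buf : List Char) : List Char → List Char × List Char
  | [] => (buf, [])
  | [c] =>
    -- `i + 1 < length` fails here, so the escape check is skipped
    if c = q then (buf, []) else (buf ++ [c], [])
  | c :: d :: rest' =>
    if c = '\\' ∧ (d = q ∨ d = '\\') then pvScanQuoteA q (buf ++ [d]) rest'
    else if c = q then (buf, d :: rest')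
    else pvScanQuoteA q (buf ++ [c]) (d :: rest')

-- A's bare-word loop `while i < length and not isspace and not in "(),"`; returns (word, rest)
def pvScanWordA (acc : List Char) : List Char → List Char × List Char
  | [] => (acc, [])
  | c :: rest =>
    if PySem.Chars.isspace c = true ∨ c = '(' ∨ c = ')' ∨ c = ',' then (acc, c :: rest)
    else pvScanWordA (acc ++ [c]) rest

-- the suffixes returned by the two scanners shrink (cited by pvTokA's decreasing_by)
lemma pvScanQuoteA_snd_len (q : Char) : ∀ (buf l : List Char), (pvScanQuoteA q buf l).2.length ≤ l.length := by
  intro buf l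
  induction buf, l using pvScanQuoteA.induct q with
  | case1 buf => simp [pvScanQuoteA]
  | case2 buf => simp [pvScanQuoteA]
  | case3 buf c h => simp [pvScanQuoteA, h]
  | case4 buf c d rest' h ih => simp only [pvScanQuoteA, if_pos h, List.length_cons]; omega
  | case5 buf d rest' h => simp [pvScanQuoteA, h]
  | case6 buf c d rest' h1 h2 ih => simp only [pvScanQuoteA, if_neg h1, if_neg h2, List.length_cons] at ih ⊢; omega

lemma pvScanWordA_snd_len : ∀ (acc l : List Char), (pvScanWordA acc l).2.length ≤ l.length := by
  intro acc l
  induction acc, l using pvScanWordA.induct with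
  | case1 acc => simp [pvScanWordA]
  | case2 acc c rest h => simp [pvScanWordA, if_pos h]
  | case3 acc c rest h ih => simp only [pvScanWordA, if_neg h, List.length_cons]; omega

-- A's outer `while i < length` loop
def pvTokA : List Char → List (String × String × Bool)
  | [] => []
  | c :: rest =>
    if PySem.Chars.isspace c = true then pvTokA rest
    else if c = '(' then ("LPAREN", "(", false) :: pvTokA rest
    else if c = ')' then ("RPAREN", ")", false) :: pvTokA rest
    else if c = ',' then ("COMMA", ",", false) :: pvTokA rest
    else if c = '"' ∨ c = '\'' then
      let r := pvScanQuoteA c [] rest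
      ("TERM", String.ofList r.1, c == '\'') :: pvTokA r.2
    else
      let r := pvScanWordA [c] rest
      if r.1 = [] then pvTokA r.2   -- `if not token_value: continue` (unreachable, kept faithfully)
      else
        let upper := PySem.Chars.upper r.1
        if upper = "AND".toList ∨ upper = "OR".toList ∨ upper = "NOT".toList then
          ("OP", String.ofList upper, false) :: pvTokA r.2
        else if upper = "NEAR".toList ∨ upper = "CLOSE".toList then
          ("NEAR", "NEAR", false) :: pvTokA r.2
        else
          ("TERM", String.ofList r.1, false) :: pvTokA r.2
termination_by l => l.length
decreasing_by
  all_goals have h1 := pvScanQuoteA_snd_len c [] rest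
  all_goals have h2 := pvScanWordA_snd_len [c] rest
  all_goals simp_all

def tokenize_match_query (query : String) : List (String × String × Bool) :=
  pvTokA query.toList

-- ===== PORT B =====
inductive PvMode where
  | dflt | word | quote | esc
deriving DecidableEq, Repr

structure PvSt where
  mode : PvMode
  buf : List Char
  q : Char
  toks : List (String × String × Bool)
deriving Repr

-- B's `_PUNCT` dict lookup
def pvPunctB (c : Char) : Option String :=
  if c = '(' then some "LPAREN"
  else if c = ')' then some "RPAREN"
  else if c = ',' then some "COMMA"
  else none

-- B's `_classify`
def pvClassifyB (w : List Char) : String × String × Bool :=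
  let upper := PySem.Chars.upper w
  if upper = "AND".toList ∨ upper = "OR".toList ∨ upper = "NOT".toList then
    ("OP", String.ofList upper, false)
  else if upper = "NEAR".toList ∨ upper = "CLOSE".toList then
    ("NEAR", "NEAR", false)
  else
    ("TERM", String.ofList w, false)

-- one iteration of B's `for ch in query` loop
def pvStepB (s : PvSt) (c : Char) : PvSt :=
  match s.mode with
  | .dflt =>
    if PySem.Chars.isspace c = true then s
    else
      match pvPunctB c with
      | some name => { s with toks := s.toks ++ [(name, String.ofList [c], false)] }
      | none =>
        if c = '\'' ∨ c = '"' then { s with mode := .quote, q := c, buf := [] }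
        else { s with mode := .word, buf := [c] }
  | .word =>
    if PySem.Chars.isspace c = true then
      { s with mode := .dflt, toks := s.toks ++ [pvClassifyB s.buf] }
    else
      match pvPunctB c with
      | some name =>
        { s with mode := .dflt, toks := s.toks ++ [pvClassifyB s.buf, (name, String.ofList [c], false)] }
      | none => { s with buf := s.buf ++ [c] }
  | .quote =>
    if c = '\\' then { s with mode := .esc }
    else if c = s.q then
      { s with mode := .dflt, toks := s.toks ++ [("TERM", String.ofList s.buf, s.q == '\'')] }
    else { s with buf := s.buf ++ [c] }
  | .esc =>
    if c = s.q ∨ c = '\\' then { s with mode := .quote, buf := s.buf ++ [c] }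
    else { s with mode := .quote, buf := s.buf ++ ['\\', c] }

-- B's trailing-token flush after the loop
def pvFinishB (s : PvSt) : List (String × String × Bool) :=
  match s.mode with
  | .dflt => s.toks
  | .word => s.toks ++ [pvClassifyB s.buf]
  | .quote => s.toks ++ [("TERM", String.ofList s.buf, s.q == '\'')]
  | .esc => s.toks ++ [("TERM", String.ofList (s.buf ++ ['\\']), s.q == '\'')]

def tokenize_match_query_alt (query : String) : List (String × String × Bool) :=
  pvFinishB (query.toList.foldl pvStepB ⟨.dflt, [], ' ', []⟩)

-- ===== PRECONDITION & SPEC =====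
def Spec_tokenize_match_query (query : String) (out : List (String × String × Bool)) : Prop := out = tokenize_match_query_alt query
instance (query : String) (out : List (String × String × Bool)) : Decidable (Spec_tokenize_match_query query out) := by unfold Spec_tokenize_match_query; infer_instance

-- ===== CLAIM (what is proved, stated in full; the proofs are below) =====
def Claim_equal_tokenize_match_query : Prop := ∀ (query : String), Dom_tokenize_match_query query → Spec_tokenize_match_query query (tokenize_match_query query)

-- ===== LEMMAS AND PROOFS =====
lemma pvScanWordA_fst_ne_nil : ∀ (acc l : List Char), acc ≠ [] → (pvScanWordA acc l).1 ≠ [] := by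
  intro acc l
  induction acc, l using pvScanWordA.induct with
  | case1 acc => intro h; simpa [pvScanWordA] using h
  | case2 acc c rest hc => intro h; simpa [pvScanWordA, if_pos hc] using h
  | case3 acc c rest hc ih => intro h; simp only [pvScanWordA, if_neg hc]; exact ih (by simp)

-- the four mode-indexed loop invariants, stated for the empty remainder
lemma pv_main_nil :
    (∀ (toks : List (String × String × Bool)) (buf : List Char) (q : Char),
        pvFinishB (List.foldl pvStepB ⟨.dflt, buf, q, toks⟩ []) = toks ++ pvTokA [])
    ∧ (∀ (toks : List (String × String × Bool)) (buf : List Char) (q : Char), buf ≠ [] →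
        pvFinishB (List.foldl pvStepB ⟨.word, buf, q, toks⟩ [])
          = toks ++ pvClassifyB (pvScanWordA buf []).1 :: pvTokA (pvScanWordA buf []).2)
    ∧ (∀ (toks : List (String × String × Bool)) (buf : List Char) (q : Char), q ≠ '\\' →
        pvFinishB (List.foldl pvStepB ⟨.quote, buf, q, toks⟩ [])
          = toks ++ ("TERM", String.ofList (pvScanQuoteA q buf []).1, q == '\'') :: pvTokA (pvScanQuoteA q buf []).2)
    ∧ (∀ (toks : List (String × String × Bool)) (buf : List Char) (q : Char), q ≠ '\\' →
        pvFinishB (List.foldl pvStepB ⟨.esc, buf, q, toks⟩ [])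
          = toks ++ ("TERM", String.ofList (pvScanQuoteA q buf ['\\']).1, q == '\'') :: pvTokA (pvScanQuoteA q buf ['\\']).2) := by
  refine ⟨?_, ?_, ?_, ?_⟩
  · intro toks buf q; simp [pvFinishB, pvTokA]
  · intro toks buf q _; simp [pvFinishB, pvScanWordA, pvTokA]
  · intro toks buf q _; simp [pvFinishB, pvScanQuoteA, pvTokA]
  · intro toks buf q hq
    have h : ¬ ('\\' = q) := fun h => hq h.symm
    simp [pvFinishB, pvScanQuoteA, pvTokA, h]

lemma pv_main (n : Nat) : ∀ (cs : List Char), cs.length ≤ n →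
    (∀ (toks : List (String × String × Bool)) (buf : List Char) (q : Char),
        pvFinishB (List.foldl pvStepB ⟨.dflt, buf, q, toks⟩ cs) = toks ++ pvTokA cs)
    ∧ (∀ (toks : List (String × String × Bool)) (buf : List Char) (q : Char), buf ≠ [] →
        pvFinishB (List.foldl pvStepB ⟨.word, buf, q, toks⟩ cs)
          = toks ++ pvClassifyB (pvScanWordA buf cs).1 :: pvTokA (pvScanWordA buf cs).2)
    ∧ (∀ (toks : List (String × String × Bool)) (buf : List Char) (q : Char), q ≠ '\\' →
        pvFinishB (List.foldl pvStepB ⟨.quote, buf, q, toks⟩ cs)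
          = toks ++ ("TERM", String.ofList (pvScanQuoteA q buf cs).1, q == '\'') :: pvTokA (pvScanQuoteA q buf cs).2)
    ∧ (∀ (toks : List (String × String × Bool)) (buf : List Char) (q : Char), q ≠ '\\' →
        pvFinishB (List.foldl pvStepB ⟨.esc, buf, q, toks⟩ cs)
          = toks ++ ("TERM", String.ofList (pvScanQuoteA q buf ('\\' :: cs)).1, q == '\'') :: pvTokA (pvScanQuoteA q buf ('\\' :: cs)).2) := by
  induction n with
  | zero =>
    intro cs hcs
    have hnil : cs = [] := List.eq_nil_of_length_eq_zero (Nat.le_zero.mp hcs)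
    subst hnil; exact pv_main_nil
  | succ n ih =>
    intro cs hcs
    cases cs with
    | nil => exact pv_main_nil
    | cons c rest =>
      have hr : rest.length ≤ n := by simpa using hcs
      obtain ⟨IH1, IH2, IH3, IH4⟩ := ih rest hr
      refine ⟨?_, ?_, ?_, ?_⟩
      · -- default mode
        intro toks buf q
        simp only [List.foldl_cons]
        by_cases hs : PySem.Chars.isspace c = true
        · rw [show pvStepB ⟨.dflt, buf, q, toks⟩ c = ⟨.dflt, buf, q, toks⟩ from by
            simp [pvStepB, hs]]
          rw [IH1]; simp [pvTokA, hs]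
        · by_cases h1 : c = '('
          · subst h1
            rw [show pvStepB ⟨.dflt, buf, q, toks⟩ '(' =
                ⟨.dflt, buf, q, toks ++ [("LPAREN", "(", false)]⟩ from by
              simp [pvStepB, pvPunctB, show PySem.Chars.isspace '(' = false by decide]]
            rw [IH1]; simp [pvTokA, show PySem.Chars.isspace '(' = false by decide]
          · by_cases h2 : c = ')'
            · subst h2
              rw [show pvStepB ⟨.dflt, buf, q, toks⟩ ')' =
                  ⟨.dflt, buf, q, toks ++ [("RPAREN", ")", false)]⟩ from by
                simp [pvStepB, pvPunctB, show PySem.Chars.isspace ')' = false by decide]]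
              rw [IH1]; simp [pvTokA, show PySem.Chars.isspace ')' = false by decide]
            · by_cases h3 : c = ','
              · subst h3
                rw [show pvStepB ⟨.dflt, buf, q, toks⟩ ',' =
                    ⟨.dflt, buf, q, toks ++ [("COMMA", ",", false)]⟩ from by
                  simp [pvStepB, pvPunctB, show PySem.Chars.isspace ',' = false by decide]]
                rw [IH1]; simp [pvTokA, show PySem.Chars.isspace ',' = false by decide]
              · by_cases hqc : c = '"' ∨ c = '\''
                · rw [show pvStepB ⟨.dflt, buf, q, toks⟩ c = ⟨.quote, [], c, toks⟩ from by
                    rcases hqc with h | h <;> subst h <;>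
                      simp [pvStepB, pvPunctB, show PySem.Chars.isspace '"' = false by decide,
                        show PySem.Chars.isspace '\'' = false by decide]]
                  have hcq : c ≠ '\\' := by rcases hqc with h | h <;> subst h <;> decide
                  rw [IH3 toks [] c hcq]
                  simp only [pvTokA, hs, if_neg h1, if_neg h2, if_neg h3, if_pos hqc,
                    Bool.false_eq_true, if_false]
                · rw [show pvStepB ⟨.dflt, buf, q, toks⟩ c = ⟨.word, [c], q, toks⟩ from by
                    have : ¬ (c = '\'' ∨ c = '"') := by tauto
                    simp [pvStepB, pvPunctB, hs, h1, h2, h3, this]]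
                  rw [IH2 toks [c] q (by simp)]
                  have hne : (pvScanWordA [c] rest).1 ≠ [] :=
                    pvScanWordA_fst_ne_nil [c] rest (by simp)
                  simp only [pvTokA, hs, if_neg h1, if_neg h2, if_neg h3, if_neg hqc,
                    Bool.false_eq_true, if_false, if_neg hne]
                  simp [pvClassifyB]
                  split_ifs <;> rfl
      · -- word mode
        intro toks buf q hbuf
        simp only [List.foldl_cons]
        by_cases hs : PySem.Chars.isspace c = true
        · rw [show pvStepB ⟨.word, buf, q, toks⟩ c = ⟨.dflt, buf, q, toks ++ [pvClassifyB buf]⟩ from by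
            simp [pvStepB, hs]]
          rw [IH1]
          simp [pvScanWordA, hs, pvTokA]
        · by_cases hpunct : c = '(' ∨ c = ')' ∨ c = ','
          · have hstop : PySem.Chars.isspace c = true ∨ c = '(' ∨ c = ')' ∨ c = ',' := by tauto
            rcases hpunct with h | h | h <;> subst h <;>
            · rw [show pvStepB ⟨.word, buf, q, toks⟩ _ =
                  ⟨.dflt, buf, q, toks ++ [pvClassifyB buf, _]⟩ from by
                simp [pvStepB, hs, pvPunctB]; rfl]
              rw [IH1]
              simp [pvScanWordA, pvTokA, hs]
          · have h1 : c ≠ '(' := by tauto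
            have h2 : c ≠ ')' := by tauto
            have h3 : c ≠ ',' := by tauto
            rw [show pvStepB ⟨.word, buf, q, toks⟩ c = ⟨.word, buf ++ [c], q, toks⟩ from by
              simp [pvStepB, hs, pvPunctB, h1, h2, h3]]
            rw [IH2 toks (buf ++ [c]) q (by simp)]
            have hstop : ¬ (PySem.Chars.isspace c = true ∨ c = '(' ∨ c = ')' ∨ c = ',') := by tauto
            simp only [pvScanWordA, if_neg hstop]
      · -- quote mode
        intro toks buf q hq
        simp only [List.foldl_cons]
        by_cases hb : c = '\\'
        · subst hb
          rw [show pvStepB ⟨.quote, buf, q, toks⟩ '\\' = ⟨.esc, buf, q, toks⟩ from by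
            simp [pvStepB]]
          exact IH4 toks buf q hq
        · by_cases hc : c = q
          · subst hc
            rw [show pvStepB ⟨.quote, buf, c, toks⟩ c =
                ⟨.dflt, buf, c, toks ++ [("TERM", String.ofList buf, c == '\'')]⟩ from by
              simp [pvStepB, hb]]
            rw [IH1]
            cases rest with
            | nil => simp [pvScanQuoteA, pvTokA]
            | cons d rest' =>
              have : ¬ (c = '\\' ∧ (d = c ∨ d = '\\')) := by tauto
              simp [pvScanQuoteA, this]
          · rw [show pvStepB ⟨.quote, buf, q, toks⟩ c = ⟨.quote, buf ++ [c], q, toks⟩ from by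
              simp [pvStepB, hb, hc]]
            rw [IH3 toks (buf ++ [c]) q hq]
            cases rest with
            | nil => simp [pvScanQuoteA, hc]
            | cons d rest' =>
              have : ¬ (c = '\\' ∧ (d = q ∨ d = '\\')) := by tauto
              simp only [pvScanQuoteA, if_neg this, if_neg hc]
      · -- escape mode
        intro toks buf q hq
        simp only [List.foldl_cons]
        by_cases he : c = q ∨ c = '\\'
        · rw [show pvStepB ⟨.esc, buf, q, toks⟩ c = ⟨.quote, buf ++ [c], q, toks⟩ from by
            simp [pvStepB, he]]
          rw [IH3 toks (buf ++ [c]) q hq]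
          simp [pvScanQuoteA, he]
        · rw [show pvStepB ⟨.esc, buf, q, toks⟩ c = ⟨.quote, buf ++ ['\\', c], q, toks⟩ from by
            simp [pvStepB, he]]
          rw [IH3 toks (buf ++ ['\\', c]) q hq]
          have hnq : ¬ (('\\' : Char) = q) := fun h => hq h.symm
          have hcq : ¬ (c = q) := by tauto
          have hcb : ¬ (c = '\\') := by tauto
          cases rest with
          | nil => simp [pvScanQuoteA, hnq, hcq, hcb]
          | cons d rest' =>
            have hno2 : ¬ (c = '\\' ∧ (d = q ∨ d = '\\')) := by tauto
            simp [pvScanQuoteA, hnq, hcq, hcb]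

-- ===== VERDICT (by name: the statement is the Claim_ definition above) =====
theorem tokenize_match_query_spec : Claim_equal_tokenize_match_query := by
  intro query _
  unfold Spec_tokenize_match_query tokenize_match_query tokenize_match_query_alt
  exact ((pv_main query.toList.length query.toList le_rfl).1 [] [] ' ').symm ▸ rfl
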